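-- pv_equiv track=rewrite | github.com/Leonardo08202689/Analizador-de-secuencias-ADN | app.py | colorear_proteina
-- ===== SOURCE A (Python) =====
-- def colorear_proteina(seq):
--     colored = ""
--     for i, aa in enumerate(seq):
--         if aa == "*":
--             colored += f'<span class="aa-stop">{aa}</span>'
--         else:
--             colored += aa
--         if (i + 1) % 10 == 0:
--             colored += " "
--     return colored
-- ===== SOURCE B (Python) =====
-- def colorear_proteina(seq):
--     out = ""
--     for i in range(0, len(seq), 10):
--         chunk = seq[i:i+10]
--         for aa in chunk:
--             out += f'<span class="aa-stop">{aa}</span>' if aa == "*" else aa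
--         if len(chunk) == 10:
--             out += " "
--     return out
-- ===== Notes on version B (the rewrite author's own statement) =====
-- stated objective: alternative
-- what changed: Replaces the per-character enumerate loop with an index-modulo test by a chunked pass: iterate over the sequence in slices of 10 (range with step 10), emit each block's characters, and append the separating space exactly when the slice is a full 10 characters.
import Mathlib
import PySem

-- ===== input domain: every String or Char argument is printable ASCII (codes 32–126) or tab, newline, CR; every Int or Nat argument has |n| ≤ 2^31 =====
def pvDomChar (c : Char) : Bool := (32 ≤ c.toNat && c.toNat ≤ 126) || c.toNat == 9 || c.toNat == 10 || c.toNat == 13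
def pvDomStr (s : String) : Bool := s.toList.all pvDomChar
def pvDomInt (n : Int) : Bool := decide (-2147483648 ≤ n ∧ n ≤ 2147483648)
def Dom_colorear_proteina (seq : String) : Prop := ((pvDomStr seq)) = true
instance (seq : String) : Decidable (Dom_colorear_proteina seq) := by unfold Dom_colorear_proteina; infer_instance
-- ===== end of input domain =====

-- B replaces A's per-character enumerate loop (index-modulo space test) by a chunked pass over
-- 10-character slices (space appended exactly after each full slice); same result, same cost.


-- ===== PORT A =====
def colorear_proteina (seq : String) : String :=
  (PySem.List.enumerate seq.toList 0).foldl
    (fun colored p =>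
      let colored := if p.2 = '*'
        then colored ++ ("<span class=\"aa-stop\">" ++ String.ofList [p.2] ++ "</span>")
        else colored ++ String.ofList [p.2]
      if PySem.Int.mod (p.1 + 1) 10 = 0 then colored ++ " " else colored)
    ""

-- ===== PORT B =====
def colorear_proteina_alt (seq : String) : String :=
  (PySem.List.pyRange 0 (seq.toList.length : Int) 10).foldl
    (fun out i =>
      let chunk := PySem.List.slice seq.toList (some i) (some (i + 10))
      let out := chunk.foldl
        (fun out aa => out ++ (if aa = '*'
          then "<span class=\"aa-stop\">" ++ String.ofList [aa] ++ "</span>"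
          else String.ofList [aa])) out
      if chunk.length = 10 then out ++ " " else out)
    ""

-- ===== PRECONDITION & SPEC =====
def Spec_colorear_proteina (seq : String) (out : String) : Prop := out = colorear_proteina_alt seq
instance (seq : String) (out : String) : Decidable (Spec_colorear_proteina seq out) := by unfold Spec_colorear_proteina; infer_instance

-- ===== CLAIM (what is proved, stated in full; the proofs are below) =====
def Claim_equal_colorear_proteina : Prop := ∀ (seq : String), Dom_colorear_proteina seq → Spec_colorear_proteina seq (colorear_proteina seq)

-- ===== LEMMAS AND PROOFS =====

-- A's loop body and loop, over an explicit character list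
def pvFA : String → (Int × Char) → String := fun colored p =>
  let colored := if p.2 = '*'
    then colored ++ ("<span class=\"aa-stop\">" ++ String.ofList [p.2] ++ "</span>")
    else colored ++ String.ofList [p.2]
  if PySem.Int.mod (p.1 + 1) 10 = 0 then colored ++ " " else colored

def pvLoopA (l : List Char) : String := (PySem.List.enumerate l 0).foldl pvFA ""

-- B's loop body (over the fixed list l) and loop
def pvFB (l : List Char) : String → Int → String := fun out i =>
  let chunk := PySem.List.slice l (some i) (some (i + 10))
  let out := chunk.foldl
    (fun out aa => out ++ (if aa = '*'
      then "<span class=\"aa-stop\">" ++ String.ofList [aa] ++ "</span>"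
      else String.ofList [aa])) out
  if chunk.length = 10 then out ++ " " else out

def pvLoopB (l : List Char) : String := (PySem.List.pyRange 0 (l.length : Int) 10).foldl (pvFB l) ""

-- the shared per-character transform and its accumulation over a block
def pvChs (c : Char) : String :=
  if c = '*' then "<span class=\"aa-stop\">" ++ String.ofList [c] ++ "</span>" else String.ofList [c]

def pvCstr (l : List Char) : String := l.foldl (fun a c => a ++ pvChs c) ""

theorem pvColorA_eq (seq : String) : colorear_proteina seq = pvLoopA seq.toList := rfl
theorem pvColorB_eq (seq : String) : colorear_proteina_alt seq = pvLoopB seq.toList := rfl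

-- a String foldl whose step appends on the right factors through the empty accumulator
theorem pvStrfoldHom {α : Type} (f : String → α → String)
    (hf : ∀ a x, f a x = a ++ f "" x) :
    ∀ (L : List α) (acc : String), L.foldl f acc = acc ++ L.foldl f "" := by
  intro L
  induction L with
  | nil => intro acc; simp
  | cons x L ih =>
      intro acc
      simp only [List.foldl_cons]
      rw [ih (f acc x), ih (f "" x), hf acc x, String.append_assoc]

theorem pvFA_hom (acc : String) (p : Int × Char) : pvFA acc p = acc ++ pvFA "" p := by
  unfold pvFA
  split_ifs <;> simp [String.append_assoc]

-- A's step in normal form: the transformed character, then the conditional space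
theorem pvFA_eq (acc : String) (p : Int × Char) :
    pvFA acc p = (acc ++ pvChs p.2) ++ (if (p.1 + 1) % 10 = 0 then " " else "") := by
  obtain ⟨i, c⟩ := p
  unfold pvFA pvChs
  rw [PySem.Int.mod_eq_emod_of_pos (by norm_num : (0:Int) < 10)]
  split_ifs <;> simp [String.append_assoc]

theorem pvInner_hom (l : List Char) (acc : String) :
    l.foldl (fun out aa => out ++ (if aa = '*'
      then "<span class=\"aa-stop\">" ++ String.ofList [aa] ++ "</span>"
      else String.ofList [aa])) acc = acc ++ pvCstr l := by
  rw [pvCstr]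
  have h := pvStrfoldHom (fun a c => a ++ pvChs c) (by intro a x; simp) l
  simp only [pvChs] at h
  exact h acc

theorem pvFB_hom (l : List Char) (acc : String) (i : Int) :
    pvFB l acc i = acc ++ pvFB l "" i := by
  unfold pvFB
  simp only [pvInner_hom, String.empty_append]
  split_ifs <;> simp [String.append_assoc]

theorem pvFoldA_acc (L : List (Int × Char)) (acc : String) :
    L.foldl pvFA acc = acc ++ L.foldl pvFA "" :=
  pvStrfoldHom pvFA pvFA_hom L acc

theorem pvFoldB_acc (l : List Char) (L : List Int) (acc : String) :
    L.foldl (pvFB l) acc = acc ++ L.foldl (pvFB l) "" :=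
  pvStrfoldHom (pvFB l) (pvFB_hom l) L acc

-- shifting every index by 10 does not change A's loop body
theorem pvAShift (d : List Char) : ∀ (s : Int) (acc : String),
    (PySem.List.enumerate d (s + 10)).foldl pvFA acc
      = (PySem.List.enumerate d s).foldl pvFA acc := by
  induction d with
  | nil => intro s acc; simp [PySem.List.enumerate_nil]
  | cons x d ih =>
      intro s acc
      rw [PySem.List.enumerate_cons, PySem.List.enumerate_cons]
      simp only [List.foldl_cons]
      have hmod : PySem.Int.mod (s + 10 + 1) 10 = PySem.Int.mod (s + 1) 10 := by
        rw [PySem.Int.mod_eq_emod_of_pos (by norm_num : (0:Int) < 10),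
            PySem.Int.mod_eq_emod_of_pos (by norm_num : (0:Int) < 10)]
        omega
      have hstep : pvFA acc (s + 10, x) = pvFA acc (s, x) := by
        unfold pvFA; rw [hmod]
      rw [hstep, show s + 10 + 1 = s + 1 + 10 by ring, ih]

-- A on a block shorter than 10 characters: no space is emitted
theorem pvASmall (t : List Char) (ht : t.length < 10) : pvLoopA t = pvCstr t := by
  rw [pvLoopA]
  have h1 : (PySem.List.enumerate t 0).foldl pvFA ""
      = (PySem.List.enumerate t 0).foldl (fun a p => a ++ pvChs p.2) "" := by
    apply PySem.List.foldl_congr_mem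
    intro acc p hp
    rw [PySem.List.mem_enumerate_iff] at hp
    obtain ⟨k, hk, rfl⟩ := hp
    rw [pvFA_eq]
    rw [if_neg (by omega)]
    exact String.append_empty
  rw [h1, pvCstr]
  conv_rhs => rw [← PySem.List.map_snd_enumerate t 0]
  rw [List.foldl_map]

-- A on a block of exactly 10 characters: one trailing space
theorem pvATen (t : List Char) (ht : t.length = 10) : pvLoopA t = pvCstr t ++ " " := by
  rcases t with _ | ⟨c0, t⟩; · simp at ht
  rcases t with _ | ⟨c1, t⟩; · simp at ht
  rcases t with _ | ⟨c2, t⟩; · simp at ht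
  rcases t with _ | ⟨c3, t⟩; · simp at ht
  rcases t with _ | ⟨c4, t⟩; · simp at ht
  rcases t with _ | ⟨c5, t⟩; · simp at ht
  rcases t with _ | ⟨c6, t⟩; · simp at ht
  rcases t with _ | ⟨c7, t⟩; · simp at ht
  rcases t with _ | ⟨c8, t⟩; · simp at ht
  rcases t with _ | ⟨c9, t⟩; · simp at ht
  rcases t with _ | ⟨c10, t⟩
  · simp only [pvLoopA, pvCstr, PySem.List.enumerate_cons, PySem.List.enumerate_nil,
      List.foldl_cons, List.foldl_nil, pvFA_eq]
    norm_num
  · simp at ht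

-- the step-10 range, peeled from the front
theorem pvRange10Cons (b : Int) (hb : 0 < b) :
    PySem.List.pyRange 0 b 10
      = 0 :: (PySem.List.pyRange 0 (b - 10) 10).map (· + 10) := by
  rw [PySem.List.pyRange_of_pos _ _ (by norm_num : (0:Int) < 10),
      PySem.List.pyRange_of_pos _ _ (by norm_num : (0:Int) < 10)]
  by_cases h10 : 10 < b
  · rw [if_pos hb, if_pos (by omega : (0:Int) < b - 10)]
    have hc : ((b - 0 + 10 - 1) / 10).toNat = ((b - 10 - 0 + 10 - 1) / 10).toNat + 1 := by omega
    rw [hc, List.range_succ_eq_map, List.map_cons, List.map_map, List.map_map]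
    refine List.cons_eq_cons.mpr ⟨by norm_num, ?_⟩
    exact List.map_congr_left (fun k _ => by
      simp only [Function.comp_apply, Nat.succ_eq_add_one]; push_cast; ring)
  · rw [if_pos hb, if_neg (by omega : ¬ (0:Int) < b - 10)]
    have hc : ((b - 0 + 10 - 1) / 10).toNat = 1 := by omega
    rw [hc]
    simp [List.range_one]

-- B on a non-empty input shorter than 10: a single partial chunk, no space
theorem pvBSmall (l : List Char) (h0 : 0 < l.length) (h10 : l.length < 10) :
    pvLoopB l = pvCstr l := by
  rw [pvLoopB, pvRange10Cons _ (by exact_mod_cast h0)]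
  have hnil : PySem.List.pyRange 0 ((l.length : Int) - 10) 10 = [] := by
    rw [PySem.List.pyRange_of_pos _ _ (by norm_num : (0:Int) < 10)]
    rw [if_neg (by omega)]
    simp
  rw [hnil]
  simp only [List.map_nil, List.foldl_cons, List.foldl_nil]
  rw [pvFB]
  have hchunk : PySem.List.slice l (some 0) (some (0 + 10)) = l := by
    rw [show ((0 : Int) + 10) = 10 by norm_num]
    rw [PySem.List.slice_toNat l (by norm_num) (by norm_num)]
    rw [show ((10:Int).toNat - (0:Int).toNat) = 10 from rfl, show ((0:Int).toNat) = 0 from rfl,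
        List.drop_zero]
    exact List.take_of_length_le (by omega)
  rw [hchunk]
  simp only [pvInner_hom, String.empty_append]
  have hne : ¬ (l.length = 10) := by omega
  rw [if_neg hne]

-- B on an input of 10 or more characters: full first chunk, then the rest shifted down by 10
theorem pvBBig (l : List Char) (h : 10 ≤ l.length) :
    pvLoopB l = (pvCstr (l.take 10) ++ " ") ++ pvLoopB (l.drop 10) := by
  rw [pvLoopB, pvRange10Cons _ (by exact_mod_cast (by omega : 0 < l.length))]
  simp only [List.foldl_cons]
  have hfirst : pvFB l "" 0 = pvCstr (l.take 10) ++ " " := by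
    rw [pvFB]
    have hchunk : PySem.List.slice l (some 0) (some (0 + 10)) = l.take 10 := by
      rw [show ((0 : Int) + 10) = 10 by norm_num]
      rw [PySem.List.slice_toNat l (by norm_num) (by norm_num)]
      rw [show ((10:Int).toNat - (0:Int).toNat) = 10 from rfl, show ((0:Int).toNat) = 0 from rfl,
          List.drop_zero]
    rw [hchunk]
    simp only [pvInner_hom, String.empty_append]
    rw [if_pos (by rw [List.length_take]; omega)]
  have hshift : ((PySem.List.pyRange 0 ((l.length : Int) - 10) 10).map (· + 10)).foldl
      (pvFB l) "" = pvLoopB (l.drop 10) := by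
    rw [List.foldl_map]
    have hcongr : (PySem.List.pyRange 0 ((l.length : Int) - 10) 10).foldl
        (fun acc i => pvFB l acc (i + 10)) ""
        = (PySem.List.pyRange 0 ((l.length : Int) - 10) 10).foldl (pvFB (l.drop 10)) "" := by
      apply PySem.List.foldl_congr_mem
      intro acc i hi
      rw [PySem.List.mem_pyRange_iff_of_pos (by norm_num)] at hi
      obtain ⟨hi0, _, _⟩ := hi
      rw [pvFB, pvFB]
      have hchunk : PySem.List.slice l (some (i + 10)) (some (i + 10 + 10))
          = PySem.List.slice (l.drop 10) (some i) (some (i + 10)) := by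
        rw [PySem.List.slice_toNat l (by omega) (by omega),
            PySem.List.slice_toNat (l.drop 10) hi0 (by omega)]
        rw [List.drop_drop]
        congr 1
        · omega
        · congr 1; omega
      rw [hchunk]
    rw [hcongr, pvLoopB]
    congr 2
    simp only [List.length_drop]
    omega
  rw [pvFoldB_acc, hfirst, hshift]

-- the main equivalence, by strong induction on the length
theorem pvMain : ∀ (n : Nat) (l : List Char), l.length ≤ n → pvLoopA l = pvLoopB l := by
  intro n
  induction n with
  | zero =>
      intro l hl
      have : l = [] := List.eq_nil_of_length_eq_zero (by omega)
      subst this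
      rw [pvLoopA, pvLoopB]
      simp [PySem.List.enumerate_nil, PySem.List.pyRange_of_pos _ _ (by norm_num : (0:Int) < 10)]
  | succ n ih =>
      intro l hl
      by_cases h0 : l.length = 0
      · have : l = [] := List.eq_nil_of_length_eq_zero h0
        subst this
        rw [pvLoopA, pvLoopB]
        simp [PySem.List.enumerate_nil, PySem.List.pyRange_of_pos _ _ (by norm_num : (0:Int) < 10)]
      · by_cases h10 : l.length < 10
        · rw [pvASmall l h10, pvBSmall l (by omega) h10]
        · -- 10 ≤ l.length : split off the first block of 10
          have hle : 10 ≤ l.length := by omega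
          have hsplit : l = l.take 10 ++ l.drop 10 := (List.take_append_drop 10 l).symm
          have hA : pvLoopA l = (pvCstr (l.take 10) ++ " ") ++ pvLoopA (l.drop 10) := by
            conv_lhs => rw [pvLoopA, hsplit]
            rw [PySem.List.enumerate_append, List.foldl_append]
            have hlen : ((l.take 10).length : Int) = 10 := by
              rw [List.length_take]; push_cast; omega
            rw [hlen]
            rw [pvAShift (l.drop 10) 0]
            rw [pvFoldA_acc (PySem.List.enumerate (l.drop 10) 0)]
            rw [show (PySem.List.enumerate (l.take 10) 0).foldl pvFA "" = pvLoopA (l.take 10) from rfl,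
                show (PySem.List.enumerate (l.drop 10) 0).foldl pvFA "" = pvLoopA (l.drop 10) from rfl]
            rw [pvATen (l.take 10) (by rw [List.length_take]; omega)]
          rw [hA, pvBBig l hle, ih (l.drop 10) (by simp only [List.length_drop]; omega)]

-- ===== VERDICT (by name: the statement is the Claim_ definition above) =====
theorem colorear_proteina_spec : Claim_equal_colorear_proteina := by
  intro seq _
  unfold Spec_colorear_proteina
  rw [pvColorA_eq, pvColorB_eq]
  exact pvMain seq.toList.length seq.toList le_rfl
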